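-- pv_equiv track=rewrite | github.com/boarderframe/BoarderframeOS | core/hq_metrics_layer.py | _get_department_icon
-- ===== SOURCE A (Python) =====
-- class BFIcons:
--     """Standardized icon set (Font Awesome)"""
--
--     # Entity icons
--     AGENT = "fa-robot"
--     LEADER = "fa-crown"
--     DEPARTMENT = "fa-building"
--     DIVISION = "fa-sitemap"
--     SERVER = "fa-server"
--     DATABASE = "fa-database"
--     REGISTRY = "fa-network-wired"
--
--     # Status icons
--     ACTIVE = "fa-check-circle"
--     INACTIVE = "fa-pause-circle"
--     WARNING = "fa-exclamation-triangle"
--     ERROR = "fa-times-circle"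
--     LOADING = "fa-spinner"
--
--     # Department category icons
--     EXECUTIVE_DEPT = "fa-crown"
--     ENGINEERING_DEPT = "fa-code"
--     OPERATIONS_DEPT = "fa-cogs"
--     INFRASTRUCTURE_DEPT = "fa-server"
--     INTELLIGENCE_DEPT = "fa-brain"
--     INNOVATION_DEPT = "fa-lightbulb"
--     RESEARCH_DEPT = "fa-flask"
--
-- def _get_department_icon(dept_name: str) -> str:
--     """Get icon for department based on name/type"""
--     name_lower = dept_name.lower()
--
--     if any(x in name_lower for x in ["executive", "leadership"]):
--         return BFIcons.EXECUTIVE_DEPT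
--     elif any(x in name_lower for x in ["engineering", "development"]):
--         return BFIcons.ENGINEERING_DEPT
--     elif any(x in name_lower for x in ["operations", "business"]):
--         return BFIcons.OPERATIONS_DEPT
--     elif any(x in name_lower for x in ["infrastructure", "systems"]):
--         return BFIcons.INFRASTRUCTURE_DEPT
--     elif any(x in name_lower for x in ["intelligence", "analytics"]):
--         return BFIcons.INTELLIGENCE_DEPT
--     elif any(x in name_lower for x in ["innovation", "research"]):
--         return BFIcons.INNOVATION_DEPT
--     else:
--         return BFIcons.DEPARTMENT
-- ===== SOURCE B (Python) =====
-- _ENTRIES = [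
--     ("executive", 0), ("leadership", 0),
--     ("engineering", 1), ("development", 1),
--     ("operations", 2), ("business", 2),
--     ("infrastructure", 3), ("systems", 3),
--     ("intelligence", 4), ("analytics", 4),
--     ("innovation", 5), ("research", 5),
-- ]
-- _ICONS = ["fa-crown", "fa-code", "fa-cogs", "fa-server",
--           "fa-brain", "fa-lightbulb", "fa-building"]
--
-- def _get_department_icon(dept_name: str) -> str:
--     """Rank every matching keyword by category priority and index the icon
--     array with the best (minimum) priority; 6 (the default icon) if none match."""
--     s = dept_name.lower()
--     return _ICONS[min((p for kw, p in _ENTRIES if kw in s), default=6)]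
-- ===== Notes on version B (the rewrite author's own statement) =====
-- stated objective: alternative
-- what changed: Instead of a prioritized if/elif chain of early returns, B scores the name: it collects the category priority of every matching keyword from a flat keyword->priority list and indexes a flat icon array with the minimum priority (default 6 = the generic icon), which coincides with the first-firing branch.
import Mathlib
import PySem

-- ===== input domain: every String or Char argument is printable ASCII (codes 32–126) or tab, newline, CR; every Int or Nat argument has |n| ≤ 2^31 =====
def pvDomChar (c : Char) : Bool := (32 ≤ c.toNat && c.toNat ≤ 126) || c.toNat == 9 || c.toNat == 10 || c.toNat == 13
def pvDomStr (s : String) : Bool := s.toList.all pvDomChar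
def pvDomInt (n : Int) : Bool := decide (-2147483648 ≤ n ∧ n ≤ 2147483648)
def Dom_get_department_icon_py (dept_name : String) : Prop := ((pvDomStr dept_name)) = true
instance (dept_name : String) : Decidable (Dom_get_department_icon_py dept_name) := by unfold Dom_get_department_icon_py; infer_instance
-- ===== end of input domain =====

-- B re-derives the icon by ranking: every matching keyword contributes its category
-- priority, the minimum priority (default 6) indexes a flat icon array (objective: alternative).


-- ===== PORT A =====
def get_department_icon_py (dept_name : String) : String :=
  let name_lower := PySem.Str.lower dept_name
  if ["executive", "leadership"].any (fun x => PySem.Str.isIn x name_lower) then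
    "fa-crown"
  else if ["engineering", "development"].any (fun x => PySem.Str.isIn x name_lower) then
    "fa-code"
  else if ["operations", "business"].any (fun x => PySem.Str.isIn x name_lower) then
    "fa-cogs"
  else if ["infrastructure", "systems"].any (fun x => PySem.Str.isIn x name_lower) then
    "fa-server"
  else if ["intelligence", "analytics"].any (fun x => PySem.Str.isIn x name_lower) then
    "fa-brain"
  else if ["innovation", "research"].any (fun x => PySem.Str.isIn x name_lower) then
    "fa-lightbulb"
  else
    "fa-building"

-- ===== PORT B =====
def pvEntries : List (String × Int) :=
  [ ("executive", 0), ("leadership", 0)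
  , ("engineering", 1), ("development", 1)
  , ("operations", 2), ("business", 2)
  , ("infrastructure", 3), ("systems", 3)
  , ("intelligence", 4), ("analytics", 4)
  , ("innovation", 5), ("research", 5) ]

def pvIcons : List String :=
  ["fa-crown", "fa-code", "fa-cogs", "fa-server", "fa-brain", "fa-lightbulb", "fa-building"]

def get_department_icon_py_alt (dept_name : String) : String :=
  let s := PySem.Str.lower dept_name
  -- _ICONS[min((p for kw, p in _ENTRIES if kw in s), default=6)]
  -- the index is always 0..6, so it is in range; "" default is never used
  PySem.List.pyGetD pvIcons
    (PySem.List.minD ((pvEntries.filter (fun e => PySem.Str.isIn e.1 s)).map (fun e => e.2))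
      (fun x => x) 6) ""

-- ===== PRECONDITION & SPEC =====
def Spec_get_department_icon_py (dept_name : String) (out : String) : Prop := out = get_department_icon_py_alt dept_name
instance (dept_name : String) (out : String) : Decidable (Spec_get_department_icon_py dept_name out) := by unfold Spec_get_department_icon_py; infer_instance

-- ===== CLAIM (what is proved, stated in full; the proofs are below) =====
def Claim_equal_get_department_icon_py : Prop := ∀ (dept_name : String), Dom_get_department_icon_py dept_name → Spec_get_department_icon_py dept_name (get_department_icon_py dept_name)

-- ===== LEMMAS AND PROOFS =====

-- hits of B, as a function of the per-keyword match booleans (same shape as List.filter+map)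
def pvHits : List Bool → List (String × Int) → List Int
  | b :: bs, e :: es => if b then e.2 :: pvHits bs es else pvHits bs es
  | _, _ => []

lemma pvHits_filter_map (p : (String × Int) → Bool) (es : List (String × Int)) :
    (es.filter p).map (fun e => e.2) = pvHits (es.map p) es := by
  induction es with
  | nil => rfl
  | cons e es ih => cases h : p e <;> simp [pvHits, h, ih]

-- the 4096 boolean cases, checked by the kernel
lemma pvTable (b0 b1 b2 b3 b4 b5 b6 b7 b8 b9 b10 b11 : Bool) :
    (if b0 || b1 then "fa-crown"
     else if b2 || b3 then "fa-code"
     else if b4 || b5 then "fa-cogs"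
     else if b6 || b7 then "fa-server"
     else if b8 || b9 then "fa-brain"
     else if b10 || b11 then "fa-lightbulb"
     else "fa-building")
    = PySem.List.pyGetD pvIcons
        (PySem.List.minD (pvHits [b0, b1, b2, b3, b4, b5, b6, b7, b8, b9, b10, b11] pvEntries)
          (fun x => x) 6) "" := by
  revert b0 b1 b2 b3 b4 b5 b6 b7 b8 b9 b10 b11
  decide

-- ===== VERDICT (by name: the statement is the Claim_ definition above) =====
theorem get_department_icon_py_spec : Claim_equal_get_department_icon_py := by
  intro s _
  unfold Spec_get_department_icon_py get_department_icon_py get_department_icon_py_alt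
  simp only [pvHits_filter_map, pvEntries, List.map, List.any_cons, List.any_nil,
    Bool.or_false]
  exact pvTable _ _ _ _ _ _ _ _ _ _ _ _
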